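-- pv_equiv track=rewrite | github.com/aravinthakshan/iaeste-resume-reader-repo | pdf_reader.py | extract_content_after_keyword
-- ===== SOURCE A (Python) =====
-- def extract_content_after_keyword(text, keyword):
--     lines = text.split('\n')
--     extracting = False
--     extracted_content = ""
--
--     for line in lines:
--         if extracting:
--             if line.strip() == "":
--                 break
--             extracted_content += line + "\n"
--         elif keyword in line:
--             extracting = True
--             extracted_content += line + "\n"
--
--     return extracted_content.strip()
-- ===== SOURCE B (Python) =====
-- def extract_content_after_keyword(text, keyword):
--     lines = text.split('\n')
--     i = next((k for k, line in enumerate(lines) if keyword in line), None)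
--     if i is None:
--         return ""
--     j = i + 1
--     while j < len(lines) and lines[j].strip() != "":
--         j += 1
--     return "\n".join(lines[i:j]).strip()
-- ===== Notes on version B (the rewrite author's own statement) =====
-- stated objective: simpler
-- what changed: Replaces A's flag-driven single pass (extracting flag, string concatenation per line, break) with a locate-then-slice decomposition: find the first line containing the keyword, find the first blank line after it, and join-and-strip that slice.
import Mathlib
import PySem

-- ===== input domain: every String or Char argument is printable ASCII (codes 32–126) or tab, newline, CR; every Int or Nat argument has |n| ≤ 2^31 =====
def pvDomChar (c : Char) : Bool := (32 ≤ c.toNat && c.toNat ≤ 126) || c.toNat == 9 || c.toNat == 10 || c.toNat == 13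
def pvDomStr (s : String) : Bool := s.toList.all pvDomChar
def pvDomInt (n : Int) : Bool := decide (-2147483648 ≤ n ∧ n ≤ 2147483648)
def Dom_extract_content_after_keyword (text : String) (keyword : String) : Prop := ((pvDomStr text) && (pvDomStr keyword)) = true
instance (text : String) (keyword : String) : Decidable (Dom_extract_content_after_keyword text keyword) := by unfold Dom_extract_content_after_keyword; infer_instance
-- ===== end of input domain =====

-- B replaces A's flag-driven single pass (extracting flag + string accumulation + break)
-- by a locate-then-slice decomposition: find the first keyword line, find the first blank
-- line after it, join the slice. Objective: simpler; same return value on every input.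

-- ===== PORT A =====
-- A's for-loop over lines with state (extracting, extracted_content); the 'break' on a
-- blank line while extracting becomes returning the accumulator.
def ecakLoop (keyword : String) : List String → Bool → String → String
  | [], _, acc => acc
  | line :: rest, extracting, acc =>
    if extracting then
      if PySem.Str.strip line == "" then acc
      else ecakLoop keyword rest true (acc ++ line ++ "\n")
    else if PySem.Str.isIn keyword line then ecakLoop keyword rest true (acc ++ line ++ "\n")
    else ecakLoop keyword rest false acc

def extract_content_after_keyword (text : String) (keyword : String) : String :=
  let lines := (PySem.Str.split? text "\n").getD []   -- sep "\n" ≠ "", so split? is always some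
  PySem.Str.strip (ecakLoop keyword lines false "")

-- ===== PORT B =====
-- B's body on the line list: i = first index whose line contains keyword (None → "");
-- j advances from i+1 while lines[j].strip() != "" (ported as i+1 + length of the
-- run of non-blank lines after i); result = "\n".join(lines[i:j]).strip().
def ecakAltBody (keyword : String) (lines : List String) : String :=
  match lines.findIdx? (fun l => PySem.Str.isIn keyword l) with
  | none => ""
  | some i =>
    let j : Nat := i + 1 + ((lines.drop (i+1)).takeWhile (fun l => !(PySem.Str.strip l == ""))).length
    PySem.Str.strip (PySem.Str.join "\n" (PySem.List.slice lines (some (i : Int)) (some (j : Int))))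

def extract_content_after_keyword_alt (text : String) (keyword : String) : String :=
  ecakAltBody keyword ((PySem.Str.split? text "\n").getD [])

-- ===== PRECONDITION & SPEC =====
def Spec_extract_content_after_keyword (text : String) (keyword : String) (out : String) : Prop := out = extract_content_after_keyword_alt text keyword
instance (text : String) (keyword : String) (out : String) : Decidable (Spec_extract_content_after_keyword text keyword out) := by unfold Spec_extract_content_after_keyword; infer_instance

-- ===== CLAIM (what is proved, stated in full; the proofs are below) =====
def Claim_equal_extract_content_after_keyword : Prop := ∀ (text : String) (keyword : String), Dom_extract_content_after_keyword text keyword → Spec_extract_content_after_keyword text keyword (extract_content_after_keyword text keyword)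

-- ===== LEMMAS AND PROOFS =====

-- stripping is insensitive to one trailing newline
theorem pv_strip_append_newline (s : String) : PySem.Str.strip (s ++ "\n") = PySem.Str.strip s := by
  apply String.ext
  simp only [PySem.Str.strip, String.toList_ofList, String.toList_append]
  show PySem.Chars.strip (s.toList ++ ['\n']) = PySem.Chars.strip s.toList
  simp only [PySem.Chars.strip, PySem.Chars.lstrip, PySem.Chars.rstrip, List.dropWhile_append]
  by_cases h : (List.dropWhile PySem.Chars.isspace s.toList).isEmpty = true
  · have h0 : List.dropWhile PySem.Chars.isspace s.toList = [] := by simpa using h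
    rw [h0, if_pos (by simp)]
    decide
  · rw [if_neg h]
    rw [List.reverse_append]
    show (List.dropWhile PySem.Chars.isspace ('\n' :: (List.dropWhile PySem.Chars.isspace s.toList).reverse)).reverse = _
    rw [List.dropWhile_cons, if_pos (by decide)]

-- A's extracting-phase accumulation, as a standalone function of the remaining lines
def ecakC : List String → String
  | [] => ""
  | l :: r => if PySem.Str.strip l == "" then "" else l ++ "\n" ++ ecakC r

theorem pv_loop_true (kw : String) : ∀ (rest : List String) (acc : String),
    ecakLoop kw rest true acc = acc ++ ecakC rest := by
  intro rest
  induction rest with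
  | nil => intro acc; simp [ecakLoop, ecakC]
  | cons l r ih =>
    intro acc
    by_cases h : PySem.Str.strip l == ""
    · simp [ecakLoop, ecakC, h]
    · simp only [ecakLoop, ecakC, h, Bool.false_eq_true, ih]
      apply String.ext; simp

theorem pv_C_eq_join : ∀ (rest : List String) (l : String),
    l ++ "\n" ++ ecakC rest
      = PySem.Str.join "\n" (l :: rest.takeWhile (fun x => !(PySem.Str.strip x == ""))) ++ "\n" := by
  intro rest
  induction rest with
  | nil =>
    intro l
    apply String.ext
    simp [ecakC, PySem.Str.join, PySem.Chars.join_singleton]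
  | cons x r ih =>
    intro l
    by_cases h : PySem.Str.strip x == ""
    · apply String.ext
      simp [ecakC, h, PySem.Str.join, PySem.Chars.join_singleton]
    · have hx : (x :: r).takeWhile (fun y => !(PySem.Str.strip y == "")) =
        x :: r.takeWhile (fun y => !(PySem.Str.strip y == "")) := by
        simp [h]
      rw [hx]
      have := ih x
      apply String.ext
      have h2 := congrArg String.toList this
      simp only [ecakC, h, Bool.false_eq_true, if_false] at h2 ⊢
      simp only [String.toList_append] at h2 ⊢
      simp only [PySem.Str.join, String.toList_ofList, List.map] at h2 ⊢
      rw [PySem.Chars.join_cons_cons]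
      simp only [List.append_assoc] at h2 ⊢
      rw [h2]

theorem pv_take_takeWhile {α : Type} (p : α → Bool) (xs : List α) :
    xs.take (xs.takeWhile p).length = xs.takeWhile p :=
  (List.prefix_iff_eq_take.mp (List.takeWhile_prefix p)).symm

theorem pv_main (kw : String) : ∀ (lines : List String),
    PySem.Str.strip (ecakLoop kw lines false "") = ecakAltBody kw lines := by
  intro lines
  induction lines with
  | nil => simp [ecakLoop, ecakAltBody]; decide
  | cons l rest ih =>
    by_cases h : PySem.Str.isIn kw l
    · simp only [ecakLoop, Bool.false_eq_true, if_false, h, if_true]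
      rw [pv_loop_true]
      have hacc : ("" ++ l ++ "\n") = l ++ "\n" := by apply String.ext; simp
      rw [hacc, pv_C_eq_join, pv_strip_append_newline]
      have hf : (l :: rest).findIdx? (fun x => PySem.Str.isIn kw x) = some 0 := by
        simp only [List.findIdx?_cons, h]
        simp
      simp only [ecakAltBody, hf]
      rw [PySem.List.slice_natCast]
      simp only [List.drop_zero, Nat.sub_zero, List.drop_succ_cons, List.drop_zero,
        Nat.zero_add, Nat.add_comm 1, List.take_succ_cons, pv_take_takeWhile]
    · simp only [ecakLoop, Bool.false_eq_true, if_false, h]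
      rw [ih]
      simp only [ecakAltBody, List.findIdx?_cons, h, Bool.false_eq_true, if_false]
      cases hf : rest.findIdx? (fun x => PySem.Str.isIn kw x) with
      | none => simp
      | some i =>
        simp only [Option.map_some]
        rw [PySem.List.slice_natCast, PySem.List.slice_natCast]
        have hd : (l :: rest).drop (i + 1 + 1) = rest.drop (i + 1) := by simp
        rw [hd]
        have hd2 : (l :: rest).drop (i + 1) = rest.drop i := by simp
        rw [hd2]
        have harith : ∀ n : Nat, i + 1 + 1 + n - (i + 1) = i + 1 + n - i := by omega
        rw [harith]

-- ===== VERDICT (by name: the statement is the Claim_ definition above) =====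
theorem extract_content_after_keyword_spec : Claim_equal_extract_content_after_keyword := by
  intro text keyword _
  unfold Spec_extract_content_after_keyword extract_content_after_keyword extract_content_after_keyword_alt
  exact pv_main keyword _
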